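-- pv_equiv track=rewrite | github.com/totalreverse/ttyT1941 | ttyT1941.py | checksum1
-- ===== SOURCE A (Python) =====
-- def parity16(b):
--     b ^= b >> 8
--     b ^= b >> 4
--     b &= 0xf
--     return (0x6996 >> b) & 1
--
-- def checksum1(buffer):
--     shiftreg = 0xc0c1
--     # shiftreg = 0x0000
--     poly = 0xc001
--     for a in buffer:
--         tmp = a ^ (shiftreg & 0xff)
--         shiftreg >>= 8
--
--         if parity16(tmp):
--             shiftreg ^= poly
--
--         tmp ^= tmp<<1
--         shiftreg ^= tmp << 6
--
--     return shiftreg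
-- ===== SOURCE B (Python) =====
-- def parity16(b):
--     b ^= b >> 8
--     b ^= b >> 4
--     b &= 0xf
--     return (0x6996 >> b) & 1
--
-- def _entry(l):
--     # contribution of the state's low byte l (0..255): 8-bit parity picks the polynomial
--     p = l ^ (l >> 4)
--     p ^= p >> 2
--     p ^= p >> 1
--     return ((p & 1) * 0xc001) ^ ((l ^ (l << 1)) << 6)
--
-- def _inject(a):
--     # contribution of the input word a, independent of the state (GF(2)-linearity)
--     return (parity16(a) * 0xc001) ^ ((a ^ (a << 1)) << 6)
--
-- _TABLE = [_entry(l) for l in range(256)]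
--
-- def checksum1(buffer):
--     # stage 1: map each input word to its state-independent contribution;
--     # stage 2: fold them into a table-driven shift register (256-entry table on the low byte)
--     shiftreg = 0xc0c1
--     for c in [_inject(a) for a in buffer]:
--         shiftreg = (shiftreg >> 8) ^ _TABLE[shiftreg & 0xff] ^ c
--     return shiftreg
-- ===== Notes on version B (the rewrite author's own statement) =====
-- stated objective: alternative
-- what changed: B exploits the GF(2)-linearity of the CRC step: a first pass maps each input word to its state-independent contribution, and the fold becomes the classic table-driven form shiftreg = (shiftreg >> 8) ^ TABLE[shiftreg & 0xff] ^ c with a 256-entry table built once from the low byte's 8-bit parity.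
import Mathlib
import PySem

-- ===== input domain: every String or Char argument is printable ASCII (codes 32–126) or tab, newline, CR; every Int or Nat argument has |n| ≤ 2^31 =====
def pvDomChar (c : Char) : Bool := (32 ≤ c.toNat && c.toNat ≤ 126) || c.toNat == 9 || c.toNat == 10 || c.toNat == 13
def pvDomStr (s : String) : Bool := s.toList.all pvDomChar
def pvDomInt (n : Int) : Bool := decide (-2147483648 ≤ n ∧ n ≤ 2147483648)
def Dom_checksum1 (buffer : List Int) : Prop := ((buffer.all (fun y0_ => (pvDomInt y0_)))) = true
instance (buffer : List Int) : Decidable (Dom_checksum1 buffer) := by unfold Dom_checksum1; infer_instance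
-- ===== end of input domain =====

-- B replaces A's per-byte inline bit twiddling by the classic table-driven CRC form: the step is
-- GF(2)-linear, so the state's low-byte contribution comes from a 256-entry table built once and the
-- input word's contribution is mapped out in a separate first pass (objective: alternative).

-- ===== PORT A =====
-- parity16: the argument of the final shift is 'band _ 15' (0 ≤ it < 16), so '.toNat' is exact.
def pyParity16 (b : Int) : Int :=
  let b1 := PySem.Int.bxor b (b >>> (8:Nat))
  let b2 := PySem.Int.bxor b1 (b1 >>> (4:Nat))
  let b3 := PySem.Int.band b2 15
  PySem.Int.band ((27030:Int) >>> b3.toNat) 1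

def checksum1Step (shiftreg : Int) (a : Int) : Int :=
  let tmp := PySem.Int.bxor a (PySem.Int.band shiftreg 255)
  let s := shiftreg >>> (8:Nat)
  let s := if pyParity16 tmp ≠ 0 then PySem.Int.bxor s 49153 else s
  let tmp2 := PySem.Int.bxor tmp (tmp <<< (1:Nat))
  PySem.Int.bxor s (tmp2 <<< (6:Nat))

def checksum1 (buffer : List Int) : Int :=
  buffer.foldl checksum1Step 49345

-- ===== PORT B =====
-- _entry(l): 8-bit parity fold of the state's low byte picks the polynomial
def csEntry (l : Int) : Int :=
  let p := PySem.Int.bxor l (l >>> (4:Nat))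
  let p := PySem.Int.bxor p (p >>> (2:Nat))
  let p := PySem.Int.bxor p (p >>> (1:Nat))
  PySem.Int.bxor (PySem.Int.band p 1 * 49153) ((PySem.Int.bxor l (l <<< (1:Nat))) <<< (6:Nat))

-- _inject(a): state-independent contribution of the input word a
def csInject (a : Int) : Int :=
  PySem.Int.bxor (pyParity16 a * 49153) ((PySem.Int.bxor a (a <<< (1:Nat))) <<< (6:Nat))

-- _TABLE = [_entry(l) for l in range(256)]
def csTable : List Int := (PySem.List.pyRange 0 256 1).map csEntry

-- the table index 'shiftreg & 0xff' is always in range; pyGetD's default is never used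
def checksum1_alt (buffer : List Int) : Int :=
  (buffer.map csInject).foldl
    (fun shiftreg c =>
      PySem.Int.bxor
        (PySem.Int.bxor (shiftreg >>> (8:Nat))
          (PySem.List.pyGetD csTable (PySem.Int.band shiftreg 255) 0)) c)
    49345

-- ===== PRECONDITION & SPEC =====
def Spec_checksum1 (buffer : List Int) (out : Int) : Prop := out = checksum1_alt buffer
instance (buffer : List Int) (out : Int) : Decidable (Spec_checksum1 buffer out) := by unfold Spec_checksum1; infer_instance

-- ===== CLAIM (what is proved, stated in full; the proofs are below) =====
def Claim_equal_checksum1 : Prop := ∀ (buffer : List Int), Dom_checksum1 buffer → Spec_checksum1 buffer (checksum1 buffer)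

-- ===== LEMMAS AND PROOFS =====

-- ---- a small testBit toolkit for Int (Python's infinite two's complement) ----

theorem intExt (m n : Int) (h : ∀ k, m.testBit k = n.testBit k) : m = n := by
  cases m with
  | ofNat a =>
    cases n with
    | ofNat b =>
      have := Nat.eq_of_testBit_eq (x := a) (y := b) (fun i => by simpa [Int.testBit] using h i)
      simp [this]
    | negSucc b =>
      exfalso
      have hk := h (a + b)
      have ha : a.testBit (a+b) = false := Nat.testBit_lt_two_pow (by
        calc a < 2 ^ a := Nat.lt_two_pow_self
        _ ≤ 2 ^ (a+b) := Nat.pow_le_pow_right (by norm_num) (by omega))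
      have hb : b.testBit (a+b) = false := Nat.testBit_lt_two_pow (by
        calc b < 2 ^ b := Nat.lt_two_pow_self
        _ ≤ 2 ^ (a+b) := Nat.pow_le_pow_right (by norm_num) (by omega))
      simp [Int.testBit, ha, hb] at hk
  | negSucc a =>
    cases n with
    | ofNat b =>
      exfalso
      have hk := h (a + b)
      have ha : a.testBit (a+b) = false := Nat.testBit_lt_two_pow (by
        calc a < 2 ^ a := Nat.lt_two_pow_self
        _ ≤ 2 ^ (a+b) := Nat.pow_le_pow_right (by norm_num) (by omega))
      have hb : b.testBit (a+b) = false := Nat.testBit_lt_two_pow (by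
        calc b < 2 ^ b := Nat.lt_two_pow_self
        _ ≤ 2 ^ (a+b) := Nat.pow_le_pow_right (by norm_num) (by omega))
      simp [Int.testBit, ha, hb] at hk
    | negSucc b =>
      have := Nat.eq_of_testBit_eq (x := a) (y := b) (fun i => by
        have := h i; simpa [Int.testBit] using this)
      simp [this]

theorem pybxor_eq (x y : Int) : PySem.Int.bxor x y = Int.xor x y := by
  cases x with
  | ofNat a =>
    cases y with
    | ofNat b => simp [PySem.Int.bxor, Int.xor]
    | negSucc b =>
      simp only [PySem.Int.bxor, Int.xor, Int.negSucc_eq, Int.ofNat_eq_natCast]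
      rw [if_pos (by omega), if_neg (by omega)]
      have h1 : (-(-((b:Int)+1)) - 1).toNat = b := by omega
      have h2 : ((a:Int)).toNat = a := rfl
      rw [h1, h2]; omega
  | negSucc a =>
    cases y with
    | ofNat b =>
      simp only [PySem.Int.bxor, Int.xor, Int.negSucc_eq, Int.ofNat_eq_natCast]
      rw [if_neg (by omega), if_pos (by omega)]
      have h1 : (-(-((a:Int)+1)) - 1).toNat = a := by omega
      have h2 : ((b:Int)).toNat = b := rfl
      rw [h1, h2]; omega
    | negSucc b =>
      simp only [PySem.Int.bxor, Int.xor, Int.negSucc_eq]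
      rw [if_neg (by omega), if_neg (by omega)]
      have h1 : (-(-((a:Int)+1)) - 1).toNat = a := by omega
      have h2 : (-(-((b:Int)+1)) - 1).toNat = b := by omega
      rw [h1, h2]

theorem and_div_two (a b : Nat) : (a &&& b) / 2 = a/2 &&& b/2 :=
  Nat.eq_of_testBit_eq fun i => by simp [Nat.testBit_div_two, Nat.testBit_and]

theorem xor_div_two (a b : Nat) : (a ^^^ b) / 2 = a/2 ^^^ b/2 :=
  Nat.eq_of_testBit_eq fun i => by simp [Nat.testBit_div_two, Nat.testBit_xor]

theorem disj_add (a : Nat) : ∀ b : Nat, a &&& b = 0 → a + b = a ^^^ b := by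
  induction a using Nat.strong_induction_on with
  | _ a ih =>
    intro b hab
    rcases Nat.eq_zero_or_pos a with rfl | ha
    · simp
    · have hd : a/2 &&& b/2 = 0 := by rw [← and_div_two, hab]
      have ihd := ih (a/2) (by omega) (b/2) hd
      have hx2 : (a ^^^ b) / 2 = a/2 ^^^ b/2 := xor_div_two a b
      have hxm : (a ^^^ b) % 2 = (a + b) % 2 := Nat.xor_mod_two_eq
      have hb0 : ¬(a % 2 = 1 ∧ b % 2 = 1) := by
        intro ⟨h1, h2⟩
        have := congrArg (fun x => x.testBit 0) hab
        simp [Nat.testBit_zero, h1, h2] at this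
      omega

theorem sub_and (m n : Nat) : m - (m &&& n) = Nat.ldiff m n := by
  have h1 : Nat.ldiff m n &&& (m &&& n) = 0 :=
    Nat.eq_of_testBit_eq fun i => by
      simp only [Nat.testBit_and, Nat.testBit_ldiff, Nat.zero_testBit]
      cases m.testBit i <;> cases n.testBit i <;> decide
  have h2 : Nat.ldiff m n ^^^ (m &&& n) = m :=
    Nat.eq_of_testBit_eq fun i => by
      simp only [Nat.testBit_xor, Nat.testBit_ldiff, Nat.testBit_and]
      cases m.testBit i <;> cases n.testBit i <;> decide
  have := disj_add (Nat.ldiff m n) (m &&& n) h1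
  omega

theorem pyband_eq (x y : Int) : PySem.Int.band x y = Int.land x y := by
  cases x with
  | ofNat a =>
    cases y with
    | ofNat b => simp [PySem.Int.band, Int.land]
    | negSucc b =>
      simp only [PySem.Int.band, Int.land, Int.negSucc_eq, Int.ofNat_eq_natCast]
      rw [if_pos (by omega), if_neg (by omega)]
      have h1 : (-(-((b:Int)+1)) - 1).toNat = b := by omega
      have h2 : ((a:Int)).toNat = a := rfl
      rw [h1, h2, sub_and]
  | negSucc a =>
    cases y with
    | ofNat b =>
      simp only [PySem.Int.band, Int.land, Int.negSucc_eq, Int.ofNat_eq_natCast]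
      rw [if_neg (by omega), if_pos (by omega)]
      have h1 : (-(-((a:Int)+1)) - 1).toNat = a := by omega
      have h2 : ((b:Int)).toNat = b := rfl
      rw [h1, h2, sub_and]
    | negSucc b =>
      simp only [PySem.Int.band, Int.land, Int.negSucc_eq]
      rw [if_neg (by omega), if_neg (by omega)]
      have h1 : (-(-((a:Int)+1)) - 1).toNat = a := by omega
      have h2 : (-(-((b:Int)+1)) - 1).toNat = b := by omega
      rw [h1, h2]; omega

theorem tb_bxor (x y : Int) (k : Nat) :
    (PySem.Int.bxor x y).testBit k = ((x.testBit k).xor (y.testBit k)) := by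
  rw [pybxor_eq, Int.testBit_lxor]

theorem tb_band (x y : Int) (k : Nat) :
    (PySem.Int.band x y).testBit k = (x.testBit k && y.testBit k) := by
  rw [pyband_eq, Int.testBit_land]

theorem tb_shr (x : Int) (n k : Nat) : (x >>> n).testBit k = x.testBit (k + n) := by
  cases x with
  | ofNat a =>
    show (Int.ofNat (a >>> n)).testBit k = _
    simp [Int.testBit, Nat.testBit_shiftRight, Nat.add_comm]
  | negSucc a =>
    show (Int.negSucc (a >>> n)).testBit k = _
    simp [Int.testBit, Nat.testBit_shiftRight, Nat.add_comm]

theorem tb_shl (x : Int) (n k : Nat) :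
    (x <<< n).testBit k = (decide (n ≤ k) && x.testBit (k - n)) := by
  cases x with
  | ofNat a =>
    have h : (Int.ofNat a) <<< n = Int.ofNat (a <<< n) := by
      rw [Int.shiftLeft_eq, Nat.shiftLeft_eq]
      simp only [Int.ofNat_eq_natCast]; push_cast; ring
    rw [h]
    simp [Int.testBit, Nat.testBit_shiftLeft, ge_iff_le]
  | negSucc a =>
    have h : (Int.negSucc a) <<< n = Int.negSucc (2^n * a + (2^n - 1)) := by
      rw [Int.shiftLeft_eq, Int.negSucc_eq]
      have h2 : (1:Nat) ≤ 2^n := Nat.one_le_two_pow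
      rw [Int.negSucc_eq]
      push_cast [h2]
      ring
    rw [h]
    simp only [Int.testBit]
    rw [Nat.testBit_two_pow_mul_add a (by have := Nat.one_le_two_pow (n := n); omega) k]
    by_cases hk : k < n
    · have hnk : ¬ n ≤ k := by omega
      simp [hk, Nat.testBit_two_pow_sub_one, hnk]
    · have hnk : n ≤ k := by omega
      simp [hk, hnk]

-- ---- GF(2)-linearity facts about the pieces of the step ----

-- 'mix': x ↦ x ^ (x >> n) commutes with xor
theorem mix_linear (u v : Int) (n : Nat) :
    PySem.Int.bxor (PySem.Int.bxor u v) ((PySem.Int.bxor u v) >>> n) =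
      PySem.Int.bxor (PySem.Int.bxor u (u >>> n)) (PySem.Int.bxor v (v >>> n)) := by
  apply intExt; intro k
  simp only [tb_bxor, tb_shr]
  cases u.testBit k <;> cases v.testBit k <;>
    cases u.testBit (k + n) <;> cases v.testBit (k + n) <;> decide

theorem band_linear (u v m : Int) :
    PySem.Int.band (PySem.Int.bxor u v) m =
      PySem.Int.bxor (PySem.Int.band u m) (PySem.Int.band v m) := by
  apply intExt; intro k
  simp only [tb_bxor, tb_band]
  cases u.testBit k <;> cases v.testBit k <;> cases m.testBit k <;> decide

-- x ^ (x << 1) splits over x = a ^ l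
theorem tmp_split (a l : Int) :
    (PySem.Int.bxor (PySem.Int.bxor a l) ((PySem.Int.bxor a l) <<< (1:Nat))) <<< (6:Nat) =
      PySem.Int.bxor ((PySem.Int.bxor a (a <<< (1:Nat))) <<< (6:Nat))
        ((PySem.Int.bxor l (l <<< (1:Nat))) <<< (6:Nat)) := by
  apply intExt; intro k
  simp only [tb_bxor, tb_shl]
  cases a.testBit (k - 6) <;> cases l.testBit (k - 6) <;>
    cases a.testBit (k - 6 - 1) <;> cases l.testBit (k - 6 - 1) <;>
    cases (decide (6 ≤ k)) <;> cases (decide (1 ≤ k - 6)) <;> decide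

-- the final 5-atom xor shuffle of the step identity
theorem xor_shuffle (S Pa Pl A6 L6 : Int) :
    PySem.Int.bxor (PySem.Int.bxor S (PySem.Int.bxor Pl L6)) (PySem.Int.bxor Pa A6) =
      PySem.Int.bxor (PySem.Int.bxor S (PySem.Int.bxor Pa Pl)) (PySem.Int.bxor A6 L6) := by
  apply intExt; intro k
  simp only [tb_bxor]
  cases S.testBit k <;> cases Pa.testBit k <;> cases Pl.testBit k <;>
    cases A6.testBit k <;> cases L6.testBit k <;> decide

-- ---- bounds ----

theorem band_mask_bounds (x m : Int) (hm : 0 ≤ m) :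
    0 ≤ PySem.Int.band x m ∧ PySem.Int.band x m ≤ m := by
  unfold PySem.Int.band
  by_cases hx : (0:Int) ≤ x
  · rw [if_pos hx, if_pos hm]
    have := Nat.and_le_right (n := x.toNat) (m := m.toNat)
    omega
  · rw [if_neg hx, if_pos hm]
    have : m.toNat - (m.toNat &&& (-x - 1).toNat) ≤ m.toNat := Nat.sub_le _ _
    omega

-- ---- parity facts ----

theorem parity01 (t : Int) : pyParity16 t = 0 ∨ pyParity16 t = 1 := by
  simp only [pyParity16]
  have := band_mask_bounds ((27030:Int) >>> (PySem.Int.band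
    (PySem.Int.bxor (PySem.Int.bxor t (t >>> (8:Nat)))
      (PySem.Int.bxor t (t >>> (8:Nat)) >>> (4:Nat))) 15).toNat) 1 (by norm_num)
  omega

-- parity of the xor of two nibbles, by exhaustive check
theorem nibNat : ∀ un : Nat, un < 16 → ∀ vn : Nat, vn < 16 →
    PySem.Int.band ((27030:Int) >>> (un ^^^ vn)) 1 =
      PySem.Int.bxor (PySem.Int.band ((27030:Int) >>> un) 1)
        (PySem.Int.band ((27030:Int) >>> vn) 1) := by decide

theorem parity_linear (a l : Int) :
    pyParity16 (PySem.Int.bxor a l) =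
      PySem.Int.bxor (pyParity16 a) (pyParity16 l) := by
  simp only [pyParity16]
  rw [mix_linear a l 8, mix_linear _ _ 4, band_linear]
  set u := PySem.Int.band (PySem.Int.bxor (PySem.Int.bxor a (a >>> (8:Nat)))
    (PySem.Int.bxor a (a >>> (8:Nat)) >>> (4:Nat))) 15 with hu
  set v := PySem.Int.band (PySem.Int.bxor (PySem.Int.bxor l (l >>> (8:Nat)))
    (PySem.Int.bxor l (l >>> (8:Nat)) >>> (4:Nat))) 15 with hv
  have hub := band_mask_bounds (PySem.Int.bxor (PySem.Int.bxor a (a >>> (8:Nat)))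
    (PySem.Int.bxor a (a >>> (8:Nat)) >>> (4:Nat))) 15 (by norm_num)
  have hvb := band_mask_bounds (PySem.Int.bxor (PySem.Int.bxor l (l >>> (8:Nat)))
    (PySem.Int.bxor l (l >>> (8:Nat)) >>> (4:Nat))) 15 (by norm_num)
  rw [← hu] at hub; rw [← hv] at hvb
  have hue : u = ((u.toNat : Nat) : Int) := by omega
  have hve : v = ((v.toNat : Nat) : Int) := by omega
  have hun : u.toNat < 16 := by omega
  have hvn : v.toNat < 16 := by omega
  rw [hue, hve, PySem.Int.bxor_natCast]
  have ht : (((u.toNat ^^^ v.toNat : Nat) : Int)).toNat = u.toNat ^^^ v.toNat := by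
    simp
  have ht2 : (((u.toNat : Nat) : Int)).toNat = u.toNat := by omega
  have ht3 : (((v.toNat : Nat) : Int)).toNat = v.toNat := by omega
  rw [ht, ht2, ht3]
  exact nibNat u.toNat hun v.toNat hvn

-- 'poly if parity else 0' as an xor-atom
def polyIf (t : Int) : Int := if pyParity16 t ≠ 0 then 49153 else 0

theorem polyIf_linear (a l : Int) :
    polyIf (PySem.Int.bxor a l) = PySem.Int.bxor (polyIf a) (polyIf l) := by
  unfold polyIf
  rw [parity_linear]
  rcases parity01 a with ha | ha <;> rcases parity01 l with hl | hl <;>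
    simp only [ha, hl] <;> decide

-- ---- the table and the injected contributions ----

set_option maxRecDepth 8192 in
theorem entryNat : ∀ ln : Nat, ln < 256 →
    csEntry (ln : Int) =
      PySem.Int.bxor (polyIf (ln : Int))
        ((PySem.Int.bxor (ln : Int) ((ln : Int) <<< (1:Nat))) <<< (6:Nat)) := by decide

theorem inject_eq (a : Int) :
    csInject a = PySem.Int.bxor (polyIf a) ((PySem.Int.bxor a (a <<< (1:Nat))) <<< (6:Nat)) := by
  unfold csInject polyIf
  rcases parity01 a with h | h <;> simp [h]

-- table lookup at the (in-range) low byte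
theorem table_lookup (l : Int) (h0 : 0 ≤ l) (h1 : l < 256) :
    PySem.List.pyGetD csTable l 0 =
      PySem.Int.bxor (polyIf l) ((PySem.Int.bxor l (l <<< (1:Nat))) <<< (6:Nat)) := by
  unfold csTable
  rw [PySem.List.pyGetD_map_pyRange_of_nonneg csEntry 256 l 0 h0 h1]
  have he : l = ((l.toNat : Nat) : Int) := by omega
  rw [he]
  exact entryNat l.toNat (by omega)

-- ---- the per-element step identity ----

theorem step_eq (s a : Int) :
    PySem.Int.bxor
        (PySem.Int.bxor (s >>> (8:Nat)) (PySem.List.pyGetD csTable (PySem.Int.band s 255) 0))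
        (csInject a) = checksum1Step s a := by
  have hb := band_mask_bounds s 255 (by norm_num)
  simp only [checksum1Step]
  rw [table_lookup (PySem.Int.band s 255) hb.1 (by omega), inject_eq]
  have hif : (if pyParity16 (PySem.Int.bxor a (PySem.Int.band s 255)) ≠ 0
      then PySem.Int.bxor (s >>> (8:Nat)) 49153 else s >>> (8:Nat)) =
      PySem.Int.bxor (s >>> (8:Nat)) (polyIf (PySem.Int.bxor a (PySem.Int.band s 255))) := by
    unfold polyIf
    split
    · rfl
    · rw [PySem.Int.bxor_zero]
  rw [hif, polyIf_linear, tmp_split]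
  exact xor_shuffle (s >>> (8:Nat)) (polyIf a) (polyIf (PySem.Int.band s 255))
    ((PySem.Int.bxor a (a <<< (1:Nat))) <<< (6:Nat))
    ((PySem.Int.bxor (PySem.Int.band s 255) ((PySem.Int.band s 255) <<< (1:Nat))) <<< (6:Nat))

-- ===== VERDICT (by name: the statement is the Claim_ definition above) =====
theorem checksum1_spec : Claim_equal_checksum1 := by
  intro buffer _
  unfold Spec_checksum1 checksum1 checksum1_alt
  rw [List.foldl_map]
  congr 1
  funext s a
  exact (step_eq s a).symm
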